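-- pv_equiv track=rewrite | github.com/bdigafe/cs598_dlh_final | behrt/commons/utils.py | position_idx
-- ===== SOURCE A (Python) =====
-- def position_idx(seq_tokens, symbol='SEP'):
--     """
--         The position index is used to encode the positional of a diagnosis code in the entire EHR of the patient.
--         The value of the position is the index of the token in the sentence: [0, 1, 2, 3, 4, 5]
--         Condition codes in the same visit (between two SEP tokens) will have the same position index.
--
--         Example:
--         Data:   [v1[D1], v2[D1,D2], v3[D1,D2,D3]]
--
--                 ---V1----   -----V2------  -------V3---------
--         tokens: [ D1, SEP,  D1, D2, SEP,   D1, D2, D3, SEP]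
--
--                 ----V1----  ----V2------   -----V3-----------
--         pos:    [0, 0,      1,  1, 1,      2,  2,  2,  2]
--
--     """
--     pos = []
--     flag = 0
--
--     for token in seq_tokens:
--         if token == symbol:
--             pos.append(flag)
--             flag += 1
--         else:
--             pos.append(flag)
--     return pos
-- ===== SOURCE B (Python) =====
-- def position_idx(seq_tokens, symbol='SEP'):
--     # Boundary/run construction: find the indices of all SEP tokens, then emit
--     # the output as constant runs: the k-th separator closes a run of value k.
--     seps = [i for i, t in enumerate(seq_tokens) if t == symbol]
--     out = []
--     prev = -1
--     for k, s in enumerate(seps):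
--         out.extend([k] * (s - prev))
--         prev = s
--     out.extend([len(seps)] * (len(seq_tokens) - 1 - prev))
--     return out
-- ===== Notes on version B (the rewrite author's own statement) =====
-- stated objective: alternative
-- what changed: Instead of counting separators per token, B first collects the list of separator positions and then builds the result as constant runs ([k] repeated up to and including the k-th separator, plus a final run), so no per-token accumulator exists.
import Mathlib
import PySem

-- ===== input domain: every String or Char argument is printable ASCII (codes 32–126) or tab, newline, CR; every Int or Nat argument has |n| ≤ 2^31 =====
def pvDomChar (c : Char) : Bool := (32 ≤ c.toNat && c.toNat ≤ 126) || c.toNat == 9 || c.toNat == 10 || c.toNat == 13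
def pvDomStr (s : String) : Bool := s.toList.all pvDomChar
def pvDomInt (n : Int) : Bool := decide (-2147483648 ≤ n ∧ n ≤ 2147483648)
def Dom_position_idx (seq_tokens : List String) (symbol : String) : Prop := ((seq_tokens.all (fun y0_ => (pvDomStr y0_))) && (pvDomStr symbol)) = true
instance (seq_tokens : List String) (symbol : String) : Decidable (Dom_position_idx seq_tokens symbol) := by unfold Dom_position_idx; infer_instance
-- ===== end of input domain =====

-- B replaces A's per-token counter loop by a boundary/run construction:
-- collect all separator positions, then emit the output as constant runs
-- (objective: alternative decomposition, same O(n) cost).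

-- ===== PORT A =====
-- A: one loop over the tokens keeping (pos, flag); every token appends flag, SEP also bumps flag.
def position_idx (seq_tokens : List String) (symbol : String) : List Int :=
  (seq_tokens.foldl
    (fun (st : List Int × Int) token =>
      if token == symbol then (st.1 ++ [st.2], st.2 + 1) else (st.1 ++ [st.2], st.2))
    ([], 0)).1

-- ===== PORT B =====
-- helper: '[i for i, t in enumerate(seq_tokens) if t == symbol]', carrying the running index i.
def pvSepIdx (symbol : String) (i : Int) : List String → List Int
  | [] => []
  | t :: ts => if t == symbol then i :: pvSepIdx symbol (i + 1) ts else pvSepIdx symbol (i + 1) ts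

-- B: seps = indices of the symbol; for k, s in enumerate(seps): out += [k]*(s-prev); prev = s;
-- finally out += [len(seps)]*(len(seq_tokens)-1-prev).  State of the loop: (out, prev, k).
def position_idx_alt (seq_tokens : List String) (symbol : String) : List Int :=
  let seps := pvSepIdx symbol 0 seq_tokens
  let F := seps.foldl
    (fun (st : List Int × Int × Int) s =>
      (st.1 ++ List.replicate (s - st.2.1).toNat st.2.2, s, st.2.2 + 1))
    ([], -1, 0)
  F.1 ++ List.replicate ((seq_tokens.length : Int) - 1 - F.2.1).toNat (seps.length : Int)

-- ===== PRECONDITION & SPEC =====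
def Spec_position_idx (seq_tokens : List String) (symbol : String) (out : List Int) : Prop := out = position_idx_alt seq_tokens symbol
instance (seq_tokens : List String) (symbol : String) (out : List Int) : Decidable (Spec_position_idx seq_tokens symbol out) := by unfold Spec_position_idx; infer_instance

-- ===== CLAIM (what is proved, stated in full; the proofs are below) =====
def Claim_equal_position_idx : Prop := ∀ (seq_tokens : List String) (symbol : String), Dom_position_idx seq_tokens symbol → Spec_position_idx seq_tokens symbol (position_idx seq_tokens symbol)

-- ===== LEMMAS AND PROOFS =====

-- Reference form of A: exclusive running count of symbol occurrences, starting at f.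
def pvGo (symbol : String) : List String → Int → List Int
  | [], _ => []
  | t :: ts, f => f :: pvGo symbol ts (if t == symbol then f + 1 else f)

theorem pvA_fold (symbol : String) (ts : List String) (acc : List Int) (f : Int) :
    (ts.foldl
      (fun (st : List Int × Int) token =>
        if token == symbol then (st.1 ++ [st.2], st.2 + 1) else (st.1 ++ [st.2], st.2))
      (acc, f)).1 = acc ++ pvGo symbol ts f := by
  induction ts generalizing acc f with
  | nil => simp [pvGo]
  | cons t ts ih =>
    simp only [List.foldl_cons]
    by_cases h : t == symbol
    · rw [if_pos h, ih]; simp [pvGo, h]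
    · rw [if_neg h, ih]; simp [pvGo, h]

-- Main invariant of B's run-building loop over the separator positions starting at i,
-- entered with state (acc, p, k) where p ≤ i - 1.
theorem pvB_main (symbol : String) (ts : List String) (i p k : Int) (acc : List Int)
    (hp : p ≤ i - 1) :
    (((pvSepIdx symbol i ts).foldl
        (fun (st : List Int × Int × Int) s =>
          (st.1 ++ List.replicate (s - st.2.1).toNat st.2.2, s, st.2.2 + 1))
        (acc, p, k)).1
      ++ List.replicate
          ((i + (ts.length : Int)) - 1
            - ((pvSepIdx symbol i ts).foldl
                (fun (st : List Int × Int × Int) s =>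
                  (st.1 ++ List.replicate (s - st.2.1).toNat st.2.2, s, st.2.2 + 1))
                (acc, p, k)).2.1).toNat
          (k + ((pvSepIdx symbol i ts).length : Int)))
      = acc ++ List.replicate (i - 1 - p).toNat k ++ pvGo symbol ts k := by
  induction ts generalizing i p k acc with
  | nil =>
    simp only [pvSepIdx, List.foldl_nil, pvGo, List.length_nil]
    simp
  | cons t ts ih =>
    by_cases h : t == symbol
    · simp only [pvSepIdx, if_pos h, List.foldl_cons, List.length_cons]
      have H := ih (i + 1) i (k + 1) (acc ++ List.replicate (i - p).toNat k) (by omega)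
      have z0 : ((i + 1 - 1 - i : Int)).toNat = 0 := by omega
      have hrep : List.replicate (i - p).toNat k
          = List.replicate (i - 1 - p).toNat k ++ [k] := by
        have hn : (i - p).toNat = (i - 1 - p).toNat + 1 := by omega
        rw [hn, List.replicate_succ']
      simp only [pvGo, h, if_pos]
      push_cast
      push_cast at H
      have e1 : (i + ((ts.length : Int) + 1) - 1 : Int) = (i + 1 + (ts.length : Int) - 1) := by ring
      have e2 : (k + (((pvSepIdx symbol (i + 1) ts).length : Int) + 1) : Int)
          = (k + 1 + ((pvSepIdx symbol (i + 1) ts).length : Int)) := by ring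
      rw [e1, e2, H, z0, hrep]
      simp
    · simp only [pvSepIdx, if_neg h, List.length_cons]
      have H := ih (i + 1) p k acc (by omega)
      simp only [pvGo, h]
      push_cast
      push_cast at H
      have e1 : (i + ((ts.length : Int) + 1) - 1 : Int) = (i + 1 + (ts.length : Int) - 1) := by ring
      rw [e1, H]
      have hn : (i + 1 - 1 - p).toNat = (i - 1 - p).toNat + 1 := by omega
      rw [hn, List.replicate_succ']
      simp

theorem position_idx_spec : Claim_equal_position_idx := by
  intro seq_tokens symbol _
  unfold Spec_position_idx position_idx
  rw [pvA_fold]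
  simp only [List.nil_append]
  have H := pvB_main symbol seq_tokens 0 (-1) 0 [] (by omega)
  have z : ((0 : Int) - 1 - (-1)).toNat = 0 := by omega
  simp only [z, List.replicate_zero, List.nil_append, List.append_nil, zero_add] at H
  unfold position_idx_alt
  simp only []
  exact H.symm
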